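-- pv_equiv track=rewrite | github.com/EEDK/StudyBaekJoon | 백준/Silver/14225. 부분수열의 합/부분수열의 합.py | solution
-- ===== SOURCE A (Python) =====
-- import itertools
--
-- def solution(arr):
--     answer = -1
--
--     result = []
--
--     for i in range(1, len(arr) + 1):
--         combine = itertools.combinations(arr, i)
--         for comb in combine:
--             result.append(sum(comb))
--
--     result = list(set(result))
--     result.sort()
--
--     num = 1
--     idx = 0
--     while True:
--         try:
--             if result[idx] != num:
--                 return num
--             num += 1
--             idx += 1
--         except:
--             return num
-- ===== SOURCE B (Python) =====
-- def solution(arr):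
--     sums = set()
--     for x in arr:
--         sums |= {s + x for s in sums} | {x}
--     m = 1
--     for s in sorted(sums):
--         if s != m:
--             break
--         m += 1
--     return m
-- ===== Notes on version B (the rewrite author's own statement) =====
-- stated objective: faster
-- what changed: B maintains the set of reachable nonempty subset sums in one incremental dynamic-programming pass (sums |= shifted sums | {x}) instead of enumerating all 2^n combinations size by size with itertools, and reads the answer off the sorted sums with a plain first-gap loop instead of A's try/except indexed scan.
import Mathlib
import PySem

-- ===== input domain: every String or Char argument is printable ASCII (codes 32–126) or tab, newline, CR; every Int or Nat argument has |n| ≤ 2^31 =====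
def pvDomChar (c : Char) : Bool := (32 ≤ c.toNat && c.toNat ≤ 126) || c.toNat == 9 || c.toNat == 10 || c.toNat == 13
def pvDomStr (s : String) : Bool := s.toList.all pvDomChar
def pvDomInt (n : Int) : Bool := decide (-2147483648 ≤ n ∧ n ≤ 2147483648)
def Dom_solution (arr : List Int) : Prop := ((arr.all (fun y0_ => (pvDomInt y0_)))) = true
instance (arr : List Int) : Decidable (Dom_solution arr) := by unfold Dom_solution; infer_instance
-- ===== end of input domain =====

-- B builds the set of reachable nonempty subset sums in one incremental dynamic-programming pass
-- instead of A's size-by-size enumeration of all 2^n combinations, then reads the answer off the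
-- sorted sums with a plain first-gap loop instead of A's try/except indexed scan.

-- ===== PORT A =====
-- A's 'while True: try/except' scan over the sorted distinct sums by index, starting at num
def scanA : List Int → Int → Int
  | [], num => num
  | s :: rest, num => if s ≠ num then num else scanA rest (num + 1)

def solution (arr : List Int) : Int :=
  let result : List Int :=
    (PySem.List.pyRange 1 (arr.length + 1) 1).foldl
      (fun acc i => acc ++ (PySem.List.combinations arr i.toNat).map List.sum) []
  let dedup := PySem.Set.ofList result        -- result = list(set(result)); its order is irrelevant: sorted next
  let sortedRes := PySem.List.sorted dedup (fun x => x) false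
  scanA sortedRes 1

-- ===== PORT B =====
-- one loop iteration: sums |= {s + x for s in sums} | {x}
def dpStep (sums : PySem.Set Int) (x : Int) : PySem.Set Int :=
  PySem.Set.union (PySem.Set.union sums (PySem.Set.ofList (sums.map (fun s => s + x)))) [x]

-- B's 'for s in sorted(sums): if s != m: break; m += 1'
def firstGap : List Int → Int → Int
  | [], m => m
  | s :: rest, m => if s ≠ m then m else firstGap rest (m + 1)

def solution_alt (arr : List Int) : Int :=
  let sums := arr.foldl dpStep PySem.Set.empty
  firstGap (PySem.List.sorted sums (fun x => x) false) 1

-- ===== PRECONDITION & SPEC =====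
def Spec_solution (arr : List Int) (out : Int) : Prop := out = solution_alt arr
instance (arr : List Int) (out : Int) : Decidable (Spec_solution arr out) := by unfold Spec_solution; infer_instance

-- ===== CLAIM (what is proved, stated in full; the proofs are below) =====
def Claim_equal_solution : Prop := ∀ (arr : List Int), Dom_solution arr → Spec_solution arr (solution arr)

-- ===== LEMMAS AND PROOFS =====

-- membership in A's raw result list is 'sum of a nonempty subsequence of arr'
theorem mem_result (arr : List Int) (s : Int) :
    (s ∈ (PySem.List.pyRange 1 (arr.length + 1) 1).foldl
      (fun acc i => acc ++ (PySem.List.combinations arr i.toNat).map List.sum) []) ↔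
    ∃ t : List Int, List.Sublist t arr ∧ t ≠ [] ∧ t.sum = s := by
  rw [PySem.List.foldl_append_eq_flatMap]
  simp only [List.nil_append, List.mem_flatMap, List.mem_map]
  constructor
  · rintro ⟨i, hi, c, hc, rfl⟩
    rw [PySem.List.mem_pyRange_one] at hi
    rw [PySem.List.mem_combinations_iff] at hc
    refine ⟨c, hc.1, ?_, rfl⟩
    intro hnil
    subst hnil
    simp at hc
    omega
  · rintro ⟨t, hsub, hne, rfl⟩
    refine ⟨(t.length : Int), ?_, t, ?_, rfl⟩
    · rw [PySem.List.mem_pyRange_one]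
      have h1 : 1 ≤ t.length := List.length_pos_of_ne_nil hne
      have h2 : t.length ≤ arr.length := hsub.length_le
      omega
    · rw [PySem.List.mem_combinations_iff]
      exact ⟨hsub, by simp⟩

theorem mem_dpStep (sums : PySem.Set Int) (x s : Int) :
    s ∈ dpStep sums x ↔ s ∈ sums ∨ (∃ z ∈ sums, z + x = s) ∨ s = x := by
  unfold dpStep
  rw [PySem.Set.mem_union, PySem.Set.mem_union, PySem.Set.mem_ofList]
  simp only [List.mem_map, List.mem_singleton]
  rw [or_assoc]

theorem nodup_dpStep (sums : PySem.Set Int) (x : Int) (h : sums.Nodup) : (dpStep sums x).Nodup :=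
  PySem.Set.nodup_union _ _ (PySem.Set.nodup_union _ _ h)

theorem nodup_foldl_dpStep (arr : List Int) : (arr.foldl dpStep PySem.Set.empty).Nodup := by
  induction arr using List.reverseRecOn with
  | nil => simp [PySem.Set.empty]
  | append_singleton l x ih =>
    rw [List.foldl_append, List.foldl_cons, List.foldl_nil]
    exact nodup_dpStep _ x ih

-- B's set of reachable sums is exactly the set of sums of nonempty subsequences
theorem mem_foldl_dpStep (arr : List Int) (s : Int) :
    s ∈ arr.foldl dpStep PySem.Set.empty ↔ ∃ t : List Int, List.Sublist t arr ∧ t ≠ [] ∧ t.sum = s := by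
  induction arr using List.reverseRecOn generalizing s with
  | nil =>
    simp only [List.foldl_nil]
    constructor
    · intro h; exact absurd h (by simp [PySem.Set.empty])
    · rintro ⟨t, hsub, hne, rfl⟩; exact absurd (List.sublist_nil.mp hsub) hne
  | append_singleton l x ih =>
    rw [List.foldl_append, List.foldl_cons, List.foldl_nil, mem_dpStep]
    constructor
    · rintro (h | ⟨z, hz, hzx⟩ | he)
      · obtain ⟨t, hsub, hne, rfl⟩ := (ih s).mp h
        exact ⟨t, hsub.trans (List.sublist_append_left l [x]), hne, rfl⟩
      · obtain ⟨t, hsub, hne, ht⟩ := (ih z).mp hz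
        refine ⟨t ++ [x], hsub.append (List.Sublist.refl [x]), by simp, ?_⟩
        rw [List.sum_append]
        simp [ht, hzx]
      · exact ⟨[x], List.sublist_append_right l [x], by simp, by simp [he]⟩
    · rintro ⟨t, hsub, hne, rfl⟩
      rw [List.sublist_append_iff] at hsub
      obtain ⟨a, b, rfl, ha, hb⟩ := hsub
      rcases List.sublist_singleton.mp hb with rfl | rfl
      · exact Or.inl ((ih _).mpr ⟨a, ha, by simpa using hne, by simp⟩)
      · cases a with
        | nil => exact Or.inr (Or.inr (by simp))
        | cons y a' =>
          refine Or.inr (Or.inl ⟨(y :: a').sum, (ih _).mpr ⟨y :: a', ha, by simp, rfl⟩, ?_⟩)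
          rw [List.sum_append]
          simp

-- the two scans are the same recursion
theorem scanA_eq_firstGap (l : List Int) : ∀ m, scanA l m = firstGap l m := by
  induction l with
  | nil => intro m; rfl
  | cons s rest ih =>
    intro m
    simp only [scanA, firstGap]
    by_cases h : s = m
    · simp [h, ih]
    · simp [h]

-- the assembly: both programs sort the same set of distinct sums, so the sorted lists are equal
theorem solution_eq_alt (arr : List Int) : solution arr = solution_alt arr := by
  unfold solution solution_alt
  simp only []
  set result : List Int :=
    (PySem.List.pyRange 1 (arr.length + 1) 1).foldl
      (fun acc i => acc ++ (PySem.List.combinations arr i.toNat).map List.sum) [] with hresult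
  set sums := arr.foldl dpStep PySem.Set.empty with hsums
  set SA := PySem.List.sorted (PySem.Set.ofList result) (fun x => x) false with hSA
  have hpair : SA.Pairwise (· < ·) := PySem.List.sorted_ofList_pairwise_lt result
  have hperm : SA.Perm sums := by
    apply (List.perm_ext_iff_of_nodup (hpair.imp fun h => ne_of_lt h) (nodup_foldl_dpStep arr)).mpr
    intro a
    rw [hSA, PySem.List.mem_sorted, PySem.Set.mem_ofList, hresult, mem_result,
      show a ∈ sums ↔ _ from mem_foldl_dpStep arr a]
  have hsorted : PySem.List.sorted sums (fun x => x) false = SA :=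
    PySem.List.sorted_eq_of_perm_of_pairwise_lt sums SA (fun x => x) hperm hpair
  rw [hsorted, scanA_eq_firstGap]

-- ===== VERDICT (by name: the statement is the Claim_ definition above) =====
theorem solution_spec : Claim_equal_solution := by
  intro arr _
  unfold Spec_solution
  exact solution_eq_alt arr
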